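-- pv_equiv track=rewrite | github.com/CR400AF2001/NJU-AI-DMCD | Assignment1/exhaustive_search.py | exhaustive
-- ===== SOURCE A (Python) =====
-- def exhaustive(data):
--     maxItemLength = max([len(each) for each in data])
--     allItems = []
--     for i in data:
--         for j in i:
--             if not j in allItems:
--                 allItems.append(j)
--     dic = {}
--     for i in range(maxItemLength):
--         nr = i + 1
--         for each in combinations(allItems, nr)[0]:
--             each = tuple(each)
--             if not each in dic.keys():
--                 dic[each] = 1
--             else:
--                 dic[each] += 1
--     return dic
--
-- def combinations(L, k):
--     n = len(L)
--     result = []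
--     for i in range(n - k + 1):
--         if k > 1:
--             newL = L[i + 1:]
--             Comb, _ = combinations(newL, k - 1)
--             for item in Comb:
--                 item.insert(0, L[i])
--                 result.append(item)
--         else:
--             result.append([L[i]])
--     return result, len(result)
-- ===== SOURCE B (Python) =====
-- def exhaustive(data):
--     maxItemLength = max([len(each) for each in data])
--     allItems = []
--     for i in data:
--         for j in i:
--             if not j in allItems:
--                 allItems.append(j)
--     dic = {}
--     after = {item: allItems[pos + 1:] for pos, item in enumerate(allItems)}
--     level = [(x,) for x in allItems]
--     for _ in range(maxItemLength):
--         nxt = []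
--         for comb in level:
--             dic[comb] = 1
--             for x in after[comb[-1]]:
--                 nxt.append(comb + (x,))
--         level = nxt
--     return dic
-- ===== Notes on version B (the rewrite author's own statement) =====
-- stated objective: alternative
-- what changed: B builds each combination level incrementally from the previous level (seeding with size-1 tuples and extending every combination by the items after its last element, via a precomputed suffix table), instead of recomputing all combinations of every size with A's recursive slicing helper.
-- outside the precondition, e.g. on exhaustive([]): A raises ValueError, B raises ValueError
import Mathlib
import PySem

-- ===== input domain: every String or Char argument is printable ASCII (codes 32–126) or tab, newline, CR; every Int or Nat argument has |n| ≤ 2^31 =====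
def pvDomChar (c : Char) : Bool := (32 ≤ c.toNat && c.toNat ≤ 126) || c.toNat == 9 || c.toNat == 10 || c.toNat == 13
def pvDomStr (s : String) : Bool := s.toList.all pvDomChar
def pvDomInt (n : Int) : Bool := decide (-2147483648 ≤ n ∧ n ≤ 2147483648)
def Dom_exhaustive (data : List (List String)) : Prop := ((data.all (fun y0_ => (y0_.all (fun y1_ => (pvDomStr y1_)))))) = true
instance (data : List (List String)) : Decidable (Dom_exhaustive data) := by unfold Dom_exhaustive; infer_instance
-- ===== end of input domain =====

-- B builds each size level incrementally from the previous one instead of recomputing every size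
-- with A's recursive combinations helper; objective: alternative (a different traversal of the same
-- exponential-size output).

-- ===== PORT A =====
-- A-side helper: the module's recursive 'combinations(L, k)'.  k is always the positive loop
-- counter nr = i + 1, ported as Nat.  L[i] is in range for every index the loop visits,
-- so xs[i] is ported with the total form pyGetD.
mutual
def combinationsA (L : List String) (k : Nat) : List (List String) × Int :=
  let n : Int := L.length
  let result := combLoopA L k (PySem.List.pyRange 0 (n - (k : Int) + 1) 1) []
  (result, result.length)
termination_by (k, 1, 0)

def combLoopA (L : List String) (k : Nat) : List Int → List (List String) → List (List String)
  | [], result => result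
  | i :: rest, result =>
    if h : 1 < k then
      let newL := PySem.List.slice L (some (i + 1)) none
      let comb := (combinationsA newL (k - 1)).1
      combLoopA L k rest (result ++ comb.map (fun item => PySem.List.pyGetD L i "" :: item))
    else
      combLoopA L k rest (result ++ [[PySem.List.pyGetD L i ""]])
termination_by idxs => (k, 0, idxs.length)
decreasing_by
  all_goals simp_wf
  · apply Prod.Lex.left; show _ < _; omega
  · apply Prod.Lex.right; apply Prod.Lex.right; show _ < _; omega
  · apply Prod.Lex.right; apply Prod.Lex.right; show _ < _; omega
end

def exhaustive (data : List (List String)) : List (List String × Int) :=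
  -- max([len(each) for each in data]) raises ValueError when data = []: excluded by Pre_exhaustive
  let maxItemLength : Int :=
    (PySem.List.max? (data.map (fun each => (each.length : Int))) (fun x => x)).getD 0
  let allItems : List String :=
    data.foldl (fun allItems i =>
      i.foldl (fun allItems j => if j ∈ allItems then allItems else allItems ++ [j]) allItems) []
  let dic : PySem.Dict (List String) Int :=
    (PySem.List.pyRange 0 maxItemLength 1).foldl (fun dic i =>
      let nr := i + 1
      ((combinationsA allItems nr.toNat).1).foldl (fun dic each =>
        if dic.contains each = false then dic.insert each 1
        else dic.modify each 0 (· + 1)) dic) PySem.Dict.empty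
  dic.items

-- ===== PORT B =====
def exhaustive_alt (data : List (List String)) : List (List String × Int) :=
  -- same max() as A: raises ValueError when data = []
  let maxItemLength : Int :=
    (PySem.List.max? (data.map (fun each => (each.length : Int))) (fun x => x)).getD 0
  let allItems : List String :=
    data.foldl (fun allItems i =>
      i.foldl (fun allItems j => if j ∈ allItems then allItems else allItems ++ [j]) allItems) []
  let after : PySem.Dict String (List String) :=
    (PySem.List.enumerate allItems).foldl
      (fun d p => d.insert p.2 (PySem.List.slice allItems (some (p.1 + 1)) none)) PySem.Dict.empty
  let fin :=
    (PySem.List.pyRange 0 maxItemLength 1).foldl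
      (fun (st : PySem.Dict (List String) Int × List (List String)) _ =>
        st.2.foldl (fun st2 comb =>
          (st2.1.insert comb 1,
           -- comb[-1] is total here (every comb on a level is nonempty)
           (after.getD (PySem.List.pyGetD comb (-1) "") []).foldl
             (fun nxt x => nxt ++ [comb ++ [x]]) st2.2)) (st.1, ([] : List (List String))))
      (PySem.Dict.empty, allItems.map (fun x => [x]))
  fin.1.items

-- ===== PRECONDITION & SPEC =====
-- Pre_ excludes only data = [], on which the Python A (and B) raises ValueError in max([]).
def Pre_exhaustive (data : List (List String)) : Prop := data ≠ []
instance (data : List (List String)) : Decidable (Pre_exhaustive data) := by unfold Pre_exhaustive; infer_instance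
def pvWitness_exhaustive : List (List String) := [["a", "b"], ["c"]]

def Spec_exhaustive (data : List (List String)) (out : List (List String × Int)) : Prop := out = exhaustive_alt data
instance (data : List (List String)) (out : List (List String × Int)) : Decidable (Spec_exhaustive data out) := by unfold Spec_exhaustive; infer_instance

-- ===== CLAIM (what is proved, stated in full; the proofs are below) =====
def Claim_equal_exhaustive : Prop := ∀ (data : List (List String)), Dom_exhaustive data → Pre_exhaustive data → Spec_exhaustive data (exhaustive data)

-- ===== LEMMAS AND PROOFS =====

-- the distinct-items accumulator loop keeps the list Nodup
theorem nodup_itemsLoop (data : List (List String)) (acc : List String) (h : acc.Nodup) :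
    (data.foldl (fun allItems i =>
      i.foldl (fun allItems j => if j ∈ allItems then allItems else allItems ++ [j]) allItems) acc).Nodup := by
  induction data generalizing acc with
  | nil => simpa using h
  | cons i rest ih =>
    refine ih _ ?_
    clear ih
    induction i generalizing acc with
    | nil => simpa using h
    | cons j js ihj =>
      by_cases hj : j ∈ acc
      · simpa [hj] using ihj acc h
      · simp only [List.foldl_cons, if_neg hj]
        exact ihj _ (by simp [List.nodup_append, h]; exact fun a ha e => hj (e ▸ ha))

-- combinations of a Nodup list are pairwise distinct
theorem nodup_combinations {α : Type} [DecidableEq α] (L : List α) (h : L.Nodup) (r : Nat) :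
    (PySem.List.combinations L r).Nodup := by
  induction L generalizing r with
  | nil =>
    cases r with
    | zero => simp [PySem.List.combinations_zero]
    | succ r => simp [PySem.List.combinations_nil_succ]
  | cons a xs ih =>
    cases r with
    | zero => simp [PySem.List.combinations_zero]
    | succ r =>
      rw [PySem.List.combinations_cons_succ]
      have hax : a ∉ xs := (List.nodup_cons.mp h).1
      have hxs : xs.Nodup := (List.nodup_cons.mp h).2
      refine List.Nodup.append ?_ (ih hxs (r+1)) ?_
      · exact (ih hxs r).map (fun c c' hc => by simpa using hc)
      · intro c hc hc'
        rcases List.mem_map.mp hc with ⟨c0, _, rfl⟩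
        have hsub := (PySem.List.mem_combinations_iff _ _ _).mp hc' |>.1
        exact hax (hsub.subset (by simp))

theorem length_of_mem_comb {α : Type} {L : List α} {r : Nat} {c : List α}
    (h : c ∈ PySem.List.combinations L r) : c.length = r :=
  ((PySem.List.mem_combinations_iff _ _ _).mp h).2

theorem ne_nil_of_mem_comb {α : Type} {L : List α} {r : Nat} {c : List α}
    (h : c ∈ PySem.List.combinations L (r+1)) : c ≠ [] := by
  intro hc; have := length_of_mem_comb h; simp [hc] at this

-- ---- A side: the recursive combinations helper computes PySem.List.combinations ----

theorem combLoopA_eq (L : List String) (k : Nat) (idxs : List Int) (acc : List (List String)) :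
    combLoopA L k idxs acc = acc ++ idxs.flatMap (fun i =>
      if 1 < k then
        ((combinationsA (PySem.List.slice L (some (i+1)) none) (k-1)).1).map
          (fun item => PySem.List.pyGetD L i "" :: item)
      else [[PySem.List.pyGetD L i ""]]) := by
  induction idxs generalizing acc with
  | nil => simp [combLoopA]
  | cons i rest ih =>
    by_cases h : 1 < k <;> simp [combLoopA, h, ih]

theorem flat_shift (k : Nat) (L : List String) :
    (List.range (L.length - (k+1))).flatMap (fun j =>
      (PySem.List.combinations (L.drop (j+1)) (k+1)).map (fun c => L.getD j "" :: c))
      = PySem.List.combinations L (k+2) := by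
  induction L with
  | nil => simp [PySem.List.combinations_nil_succ]
  | cons a xs ih =>
    by_cases hlen : xs.length < k + 1
    · have h0 : xs.length - k = 0 := by omega
      have h2 : (a :: xs).length < k+2 := by simp; omega
      simp [h0, PySem.List.combinations_eq_nil_of_length_lt _ h2]
    · have h1 : (a :: xs).length - (k+1) = (xs.length - (k+1)) + 1 := by simp; omega
      rw [h1, List.range_succ_eq_map, List.flatMap_cons, List.flatMap_map]
      simp only [List.getD_cons_zero, List.getD_cons_succ, List.drop_succ_cons, Nat.succ_eq_add_one]
      rw [ih, PySem.List.combinations_cons_succ]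
      simp

theorem combA_char (k : Nat) : ∀ (L : List String),
    (combinationsA L (k+1)).1 = PySem.List.combinations L (k+1) := by
  induction k with
  | zero =>
    intro L
    rw [combinationsA, combLoopA_eq]
    have h1 : (L.length : Int) - (1 : Nat) + 1 = PySem.List.len L := by
      rw [PySem.List.len_eq]; push_cast; ring
    simp only [h1]
    have h2 : ∀ i : Int, (if 1 < 1 then
        ((combinationsA (PySem.List.slice L (some (i+1)) none) (1-1)).1).map
          (fun item => PySem.List.pyGetD L i "" :: item)
      else [[PySem.List.pyGetD L i ""]]) = [[PySem.List.pyGetD L i ""]] := by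
      intro i; simp
    simp only [h2]
    have hh : ∀ (l : List Int), l.flatMap (fun i => [[PySem.List.pyGetD L i ""]])
        = (l.map (fun i => PySem.List.pyGetD L i "")).map (fun s => [s]) := by
      intro l; induction l with
      | nil => simp
      | cons b bs ihb => simp [ihb]
    rw [hh, PySem.List.map_pyGetD_pyRange_zero L "", PySem.List.combinations_one]
    simp
  | succ k ih =>
    intro L
    rw [combinationsA, combLoopA_eq]
    have hk2 : (1 : Nat) < k + 2 := by omega
    simp only [if_pos hk2, Nat.add_sub_cancel, List.nil_append]
    simp only [ih]
    rw [PySem.List.pyRange_one, List.flatMap_map]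
    have hbody : ∀ j : Nat,
        (PySem.List.combinations (PySem.List.slice L (some ((0:Int) + (j:Int) + 1)) none) (k+1)).map
          (fun item => PySem.List.pyGetD L ((0:Int) + (j:Int)) "" :: item)
        = (PySem.List.combinations (L.drop (j+1)) (k+1)).map (fun c => L.getD j "" :: c) := by
      intro j
      have hs : ((0:Int) + (j:Int) + 1) = ((j+1 : Nat) : Int) := by push_cast; ring
      rw [hs, PySem.List.slice_from_natCast]
      have hg : ((0:Int) + (j:Int)) = ((j : Nat) : Int) := by ring
      rw [hg, PySem.List.pyGetD_natCast]
    have hlen : (((L.length : Int) - (↑(k+2) : Int) + 1) - 0).toNat = L.length - (k+1) := by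
      push_cast; omega
    simp only [hbody, hlen]
    exact flat_shift k L

-- ---- B side ----

-- the extension step B performs on one combination
def extOne (L : List String) (comb : List String) : List (List String) :=
  (L.drop (L.idxOf (comb.getLast?.getD "") + 1)).map (fun x => comb ++ [x])

theorem foldl_insert_getD_not_mem (ps : List (String × List String))
    (d : PySem.Dict String (List String)) (x : String) (v0 : List String)
    (hx : x ∉ ps.map Prod.fst) :
    (ps.foldl (fun d q => d.insert q.1 q.2) d).getD x v0 = d.getD x v0 := by
  induction ps generalizing d with
  | nil => rfl
  | cons q rest ih =>
    simp only [List.map_cons, List.mem_cons, not_or] at hx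
    simp only [List.foldl_cons]
    rw [ih _ hx.2, PySem.Dict.getD_insert_of_ne _ _ _ hx.1]

theorem foldl_insert_getD_mem (ps : List (String × List String))
    (d : PySem.Dict String (List String)) (x : String) (w : List String) (v0 : List String)
    (hnd : (ps.map Prod.fst).Nodup) (hmem : (x, w) ∈ ps) :
    (ps.foldl (fun d q => d.insert q.1 q.2) d).getD x v0 = w := by
  induction ps generalizing d with
  | nil => simp at hmem
  | cons q rest ih =>
    simp only [List.map_cons, List.nodup_cons] at hnd
    rcases List.mem_cons.mp hmem with hh | hh
    · simp only [List.foldl_cons]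
      rw [foldl_insert_getD_not_mem _ _ _ _ (by rw [← hh] at hnd; exact hnd.1)]
      rw [← hh]
      exact PySem.Dict.getD_insert_self _ _ _ _
    · exact ih _ hnd.2 hh

-- the 'after' dict looks up the tail of allItems after x
theorem after_getD (L : List String) (h : L.Nodup) (x : String) (hx : x ∈ L) :
    ((PySem.List.enumerate L).foldl
      (fun d p => d.insert p.2 (PySem.List.slice L (some (p.1 + 1)) none)) PySem.Dict.empty).getD x []
      = L.drop (L.idxOf x + 1) := by
  have hfm : ((PySem.List.enumerate L).foldl
      (fun d p => d.insert p.2 (PySem.List.slice L (some (p.1 + 1)) none)) PySem.Dict.empty)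
      = (((PySem.List.enumerate L).map
          (fun p => (p.2, PySem.List.slice L (some (p.1 + 1)) none))).foldl
          (fun d q => d.insert q.1 q.2) PySem.Dict.empty) := by
    rw [List.foldl_map]
  rw [hfm]
  have hjlt : L.idxOf x < L.length := List.idxOf_lt_length_of_mem hx
  apply foldl_insert_getD_mem
  · have hkfst : (((PySem.List.enumerate L).map
        (fun p => (p.2, PySem.List.slice L (some (p.1 + 1)) none))).map Prod.fst) = L := by
      rw [List.map_map]
      exact PySem.List.map_snd_enumerate L 0
    rw [hkfst]; exact h
  · apply List.mem_map.mpr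
    refine ⟨((L.idxOf x : Int), x), ?_, ?_⟩
    · rw [show PySem.List.enumerate L = PySem.List.enumerate L 0 from rfl,
        PySem.List.mem_enumerate_iff]
      exact ⟨L.idxOf x, hjlt, by simp [List.getElem_idxOf hjlt]⟩
    · simp only
      rw [show ((L.idxOf x : Int) + 1) = ((L.idxOf x + 1 : Nat) : Int) by push_cast; ring,
        PySem.List.slice_from_natCast]

theorem getLastD_eq (c : List String) (hc : c ≠ []) : c.getLast?.getD "" = c.getLast hc := by
  rw [List.getLast?_eq_getLast hc]; rfl

theorem getLastD_mem (c : List String) (hc : c ≠ []) : c.getLast?.getD "" ∈ c := by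
  rw [getLastD_eq c hc]; exact List.getLast_mem hc

theorem extOne_cons_of_mem (a : String) (xs : List String) (hax : a ∉ xs) (c : List String)
    (hc : c ≠ []) (hsub : ∀ y ∈ c, y ∈ xs) :
    extOne (a :: xs) c = extOne xs c := by
  unfold extOne
  have hlast : c.getLast?.getD "" ∈ xs := hsub _ (getLastD_mem c hc)
  have hne : a ≠ c.getLast?.getD "" := fun e => hax (e ▸ hlast)
  rw [List.idxOf_cons_ne _ hne]
  simp [Nat.succ_eq_add_one, List.drop_succ_cons]

-- extending one level gives the next level
theorem step_level : ∀ (L : List String), L.Nodup → ∀ (k : Nat),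
    (PySem.List.combinations L (k+1)).flatMap (extOne L) = PySem.List.combinations L (k+2) := by
  intro L
  induction L with
  | nil => intro _ k; simp [PySem.List.combinations_nil_succ]
  | cons a xs ih =>
    intro hnd k
    obtain ⟨hax, hxs⟩ := List.nodup_cons.mp hnd
    rw [PySem.List.combinations_cons_succ, List.flatMap_append]
    have hmem_sub : ∀ {r : Nat} {c : List String}, c ∈ PySem.List.combinations xs r →
        ∀ y ∈ c, y ∈ xs :=
      fun hc y hy => (((PySem.List.mem_combinations_iff _ _ _).mp hc).1.subset) hy
    have part2 : (PySem.List.combinations xs (k+1)).flatMap (extOne (a :: xs))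
        = PySem.List.combinations xs (k+2) := by
      rw [← ih hxs k]
      apply List.flatMap_congr
      intro c hc
      exact extOne_cons_of_mem a xs hax c (ne_nil_of_mem_comb hc) (hmem_sub hc)
    have part1 : ((PySem.List.combinations xs k).map (fun c => a :: c)).flatMap (extOne (a :: xs))
        = (PySem.List.combinations xs (k+1)).map (fun c => a :: c) := by
      rw [List.flatMap_map]
      cases k with
      | zero =>
        simp [PySem.List.combinations_zero, PySem.List.combinations_one, extOne,
          List.idxOf_cons_self, List.map_map]
      | succ k' =>
        have hstep : ∀ c ∈ PySem.List.combinations xs (k'+1),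
            extOne (a :: xs) (a :: c) = (extOne xs c).map (fun l => a :: l) := by
          intro c hc
          have hc0 := ne_nil_of_mem_comb hc
          have hsub := hmem_sub hc
          have hlastc : (a :: c).getLast?.getD "" = c.getLast?.getD "" := by
            cases c with
            | nil => exact absurd rfl hc0
            | cons b bs => rw [List.getLast?_cons_cons]
          unfold extOne
          rw [hlastc]
          have hlast : c.getLast?.getD "" ∈ xs := hsub _ (getLastD_mem c hc0)
          have hne : a ≠ c.getLast?.getD "" := fun e => hax (e ▸ hlast)
          rw [List.idxOf_cons_ne _ hne]
          simp [Nat.succ_eq_add_one, List.drop_succ_cons, List.map_map, Function.comp_def]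
        rw [List.flatMap_congr hstep, ← List.map_flatMap, ih hxs k']
    rw [part1, part2, PySem.List.combinations_cons_succ]

-- ---- dict building over a fresh, duplicate-free key stream ----

theorem dictA_stream (ks : List (List String)) (d : PySem.Dict (List String) Int)
    (hfresh : ∀ c ∈ ks, c ∉ d.keys) (hnd : ks.Nodup) :
    ((ks.foldl (fun dic each =>
        if dic.contains each = false then dic.insert each 1
        else dic.modify each 0 (· + 1)) d).items = d.items ++ ks.map (fun c => (c, 1)))
    ∧ ((ks.foldl (fun dic each =>
        if dic.contains each = false then dic.insert each 1
        else dic.modify each 0 (· + 1)) d).keys = d.keys ++ ks) := by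
  induction ks generalizing d with
  | nil => simp
  | cons c rest ih =>
    have hc : c ∉ d.keys := hfresh c List.mem_cons_self
    have hcont : d.contains c = false := by
      rw [PySem.Dict.contains_eq_decide_mem_keys]; simp [hc]
    have hkeys' := PySem.Dict.keys_insert_of_not_contains d (1 : Int) hcont
    have hitems' := PySem.Dict.items_insert_of_not_contains d (1 : Int) hcont
    obtain ⟨hnd1, hnd2⟩ := List.nodup_cons.mp hnd
    have hfresh' : ∀ c' ∈ rest, c' ∉ (d.insert c 1).keys := by
      intro c' hc'
      rw [hkeys']
      simp only [List.mem_append, List.mem_singleton, not_or]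
      exact ⟨hfresh c' (List.mem_cons_of_mem _ hc'), fun e => hnd1 (e ▸ hc')⟩
    simp only [List.foldl_cons, if_pos hcont]
    obtain ⟨ihi, ihk⟩ := ih (d.insert c 1) hfresh' hnd2
    exact ⟨by rw [ihi, hitems']; simp, by rw [ihk, hkeys']; simp⟩

theorem dictB_stream (ks : List (List String)) (d : PySem.Dict (List String) Int)
    (hfresh : ∀ c ∈ ks, c ∉ d.keys) (hnd : ks.Nodup) :
    ((ks.foldl (fun dic each => dic.insert each 1) d).items = d.items ++ ks.map (fun c => (c, 1)))
    ∧ ((ks.foldl (fun dic each => dic.insert each 1) d).keys = d.keys ++ ks) := by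
  induction ks generalizing d with
  | nil => simp
  | cons c rest ih =>
    have hc : c ∉ d.keys := hfresh c List.mem_cons_self
    have hcont : d.contains c = false := by
      rw [PySem.Dict.contains_eq_decide_mem_keys]; simp [hc]
    have hkeys' := PySem.Dict.keys_insert_of_not_contains d (1 : Int) hcont
    have hitems' := PySem.Dict.items_insert_of_not_contains d (1 : Int) hcont
    obtain ⟨hnd1, hnd2⟩ := List.nodup_cons.mp hnd
    have hfresh' : ∀ c' ∈ rest, c' ∉ (d.insert c 1).keys := by
      intro c' hc'
      rw [hkeys']
      simp only [List.mem_append, List.mem_singleton, not_or]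
      exact ⟨hfresh c' (List.mem_cons_of_mem _ hc'), fun e => hnd1 (e ▸ hc')⟩
    simp only [List.foldl_cons]
    obtain ⟨ihi, ihk⟩ := ih (d.insert c 1) hfresh' hnd2
    exact ⟨by rw [ihi, hitems']; simp, by rw [ihk, hkeys']; simp⟩

-- the combinations of sizes 1..m, in A's (and B's) emission order
def streamS (L : List String) (m : Nat) : List (List String) :=
  (List.range m).flatMap (fun j => PySem.List.combinations L (j+1))

theorem mem_streamS_length {L : List String} {m : Nat} {c : List String}
    (h : c ∈ streamS L m) : 1 ≤ c.length ∧ c.length ≤ m := by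
  rcases List.mem_flatMap.mp h with ⟨j, hj, hc⟩
  have := length_of_mem_comb hc
  have hjm := List.mem_range.mp hj
  omega

theorem streamS_succ (L : List String) (m : Nat) :
    streamS L (m+1) = streamS L m ++ PySem.List.combinations L (m+1) := by
  unfold streamS
  rw [List.range_succ, List.flatMap_append]
  simp

theorem fresh_of_streamS (L : List String) (m : Nat) :
    ∀ c ∈ PySem.List.combinations L (m+1), c ∉ streamS L m := by
  intro c hc hmem
  have h1 := mem_streamS_length hmem
  have h2 := length_of_mem_comb hc
  omega

-- ---- outer loop invariants (proof-side names for the two folds) ----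

def innerA (dic : PySem.Dict (List String) Int) (each : List String) : PySem.Dict (List String) Int :=
  if dic.contains each = false then dic.insert each 1 else dic.modify each 0 (· + 1)

def bodyA (L : List String) (dic : PySem.Dict (List String) Int) (i : Int) :
    PySem.Dict (List String) Int :=
  ((combinationsA L (i + 1).toNat).1).foldl (fun dic each =>
    if dic.contains each = false then dic.insert each 1
    else dic.modify each 0 (· + 1)) dic

def dictAFold (L : List String) (M : Int) : PySem.Dict (List String) Int :=
  (PySem.List.pyRange 0 M 1).foldl (bodyA L) PySem.Dict.empty

def innerB (after : PySem.Dict String (List String))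
    (st2 : PySem.Dict (List String) Int × List (List String)) (comb : List String) :
    PySem.Dict (List String) Int × List (List String) :=
  (st2.1.insert comb 1,
   (after.getD (PySem.List.pyGetD comb (-1) "") []).foldl
     (fun nxt x => nxt ++ [comb ++ [x]]) st2.2)

def bodyB (after : PySem.Dict String (List String))
    (st : PySem.Dict (List String) Int × List (List String)) (_ : Int) :
    PySem.Dict (List String) Int × List (List String) :=
  st.2.foldl (innerB after) (st.1, ([] : List (List String)))

def bFold (L : List String) (after : PySem.Dict String (List String)) (M : Int) :
    PySem.Dict (List String) Int × List (List String) :=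
  (PySem.List.pyRange 0 M 1).foldl (bodyB after) (PySem.Dict.empty, L.map (fun x => [x]))

theorem pairFold (after : PySem.Dict String (List String)) (lvl : List (List String))
    (d : PySem.Dict (List String) Int) (n0 : List (List String)) :
    lvl.foldl (innerB after) (d, n0)
      = (lvl.foldl (fun d c => d.insert c 1) d,
         n0 ++ lvl.flatMap (fun comb =>
           (after.getD (PySem.List.pyGetD comb (-1) "") []).map (fun x => comb ++ [x]))) := by
  induction lvl generalizing d n0 with
  | nil => simp
  | cons c rest ih =>
    simp only [List.foldl_cons, List.flatMap_cons]
    rw [show innerB after (d, n0) c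
        = (d.insert c 1, n0 ++ (after.getD (PySem.List.pyGetD c (-1) "") []).map (fun x => c ++ [x]))
      from by unfold innerB; rw [PySem.List.foldl_append_singleton_eq_map]]
    rw [ih]
    simp [List.append_assoc]

theorem AInv (L : List String) (h : L.Nodup) (m : Nat) :
    (dictAFold L (m : Int)).items = (streamS L m).map (fun c => (c, 1))
    ∧ (dictAFold L (m : Int)).keys = streamS L m := by
  induction m with
  | zero =>
    have h0 : PySem.List.pyRange 0 ((0 : Nat) : Int) 1 = [] := by
      rw [show (((0 : Nat) : Int)) = (0 : Int) by simp]
      exact PySem.List.pyRange_one_eq_nil le_rfl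
    unfold dictAFold
    rw [h0]
    exact ⟨rfl, rfl⟩
  | succ m ih =>
    obtain ⟨ihi, ihk⟩ := ih
    have hcast : (((m + 1 : Nat)) : Int) = ((m : Nat) : Int) + 1 := by push_cast; ring
    unfold dictAFold
    rw [hcast, PySem.List.pyRange_one_succ_right (by positivity), List.foldl_append,
      List.foldl_cons, List.foldl_nil]
    have hbody : bodyA L ((PySem.List.pyRange 0 ((m : Nat) : Int) 1).foldl (bodyA L) PySem.Dict.empty) ((m : Nat) : Int)
        = (PySem.List.combinations L (m+1)).foldl (fun dic each =>
            if dic.contains each = false then dic.insert each 1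
            else dic.modify each 0 (· + 1)) (dictAFold L (m : Int)) := by
      unfold bodyA dictAFold
      rw [show (((m : Nat) : Int) + 1).toNat = m + 1 by omega, combA_char m L]
      rfl
    rw [hbody]
    have hfresh : ∀ c ∈ PySem.List.combinations L (m+1), c ∉ (dictAFold L (m : Int)).keys := by
      intro c hc
      rw [ihk]
      exact fresh_of_streamS L m c hc
    obtain ⟨hdi, hdk⟩ := dictA_stream (PySem.List.combinations L (m+1)) (dictAFold L (m : Int))
      hfresh (nodup_combinations L h (m+1))
    constructor
    · rw [hdi, ihi, streamS_succ]; simp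
    · rw [hdk, ihk, streamS_succ]

theorem BInv (L : List String) (h : L.Nodup) (after : PySem.Dict String (List String))
    (hafter : ∀ x ∈ L, after.getD x [] = L.drop (L.idxOf x + 1)) (m : Nat) :
    (bFold L after (m : Int)).1.items = (streamS L m).map (fun c => (c, 1))
    ∧ (bFold L after (m : Int)).1.keys = streamS L m
    ∧ (bFold L after (m : Int)).2 = PySem.List.combinations L (m+1) := by
  induction m with
  | zero =>
    have h0 : PySem.List.pyRange 0 ((0 : Nat) : Int) 1 = [] := by
      rw [show (((0 : Nat) : Int)) = (0 : Int) by simp]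
      exact PySem.List.pyRange_one_eq_nil le_rfl
    unfold bFold
    rw [h0, List.foldl_nil]
    exact ⟨rfl, rfl, (PySem.List.combinations_one L).symm⟩
  | succ m ih =>
    obtain ⟨ihi, ihk, ihl⟩ := ih
    have hcast : (((m + 1 : Nat)) : Int) = ((m : Nat) : Int) + 1 := by push_cast; ring
    unfold bFold
    rw [hcast, PySem.List.pyRange_one_succ_right (by positivity), List.foldl_append,
      List.foldl_cons, List.foldl_nil]
    have hstate : (PySem.List.pyRange 0 ((m : Nat) : Int) 1).foldl (bodyB after)
        (PySem.Dict.empty, L.map (fun x => [x])) = bFold L after (m : Int) := rfl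
    rw [hstate]
    unfold bodyB
    rw [ihl, pairFold]
    -- the extension of each combination is extOne
    have hext : (PySem.List.combinations L (m+1)).flatMap (fun comb =>
        (after.getD (PySem.List.pyGetD comb (-1) "") []).map (fun x => comb ++ [x]))
        = (PySem.List.combinations L (m+1)).flatMap (extOne L) := by
      apply List.flatMap_congr
      intro c hc
      have hc0 := ne_nil_of_mem_comb hc
      have hlast : c.getLast?.getD "" ∈ L :=
        (((PySem.List.mem_combinations_iff _ _ _).mp hc).1.subset) (getLastD_mem c hc0)
      rw [PySem.List.pyGetD_neg_one c "" hc0, ← getLastD_eq c hc0, hafter _ hlast]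
      rfl
    have hfresh : ∀ c ∈ PySem.List.combinations L (m+1), c ∉ (bFold L after (m : Int)).1.keys := by
      intro c hc
      rw [ihk]
      exact fresh_of_streamS L m c hc
    obtain ⟨hdi, hdk⟩ := dictB_stream (PySem.List.combinations L (m+1)) (bFold L after (m : Int)).1
      hfresh (nodup_combinations L h (m+1))
    refine ⟨?_, ?_, ?_⟩
    · rw [hdi, ihi, streamS_succ]; simp
    · rw [hdk, ihk, streamS_succ]
    · simp only [List.nil_append]
      rw [hext]
      exact step_level L h m

-- ---- final assembly ----

def itemsOf (data : List (List String)) : List String :=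
  data.foldl (fun allItems i =>
    i.foldl (fun allItems j => if j ∈ allItems then allItems else allItems ++ [j]) allItems) []

def maxOf (data : List (List String)) : Int :=
  (PySem.List.max? (data.map (fun each => (each.length : Int))) (fun x => x)).getD 0

def afterOf (L : List String) : PySem.Dict String (List String) :=
  (PySem.List.enumerate L).foldl
    (fun d p => d.insert p.2 (PySem.List.slice L (some (p.1 + 1)) none)) PySem.Dict.empty

theorem maxOf_nonneg (data : List (List String)) : 0 ≤ maxOf data := by
  unfold maxOf
  cases hm : PySem.List.max? (data.map (fun each => (each.length : Int))) (fun x => x) with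
  | none => simp
  | some v =>
    have hv := PySem.List.max?_mem hm
    rcases List.mem_map.mp hv with ⟨each, _, rfl⟩
    simp

theorem main_eq (L : List String) (hnd : L.Nodup) (after : PySem.Dict String (List String))
    (hafter : ∀ x ∈ L, after.getD x [] = L.drop (L.idxOf x + 1)) (M : Int) (hM : 0 ≤ M) :
    (dictAFold L M).items = (bFold L after M).1.items := by
  obtain ⟨m, rfl⟩ : ∃ m : Nat, M = (m : Int) := ⟨M.toNat, (Int.toNat_of_nonneg hM).symm⟩
  rw [(AInv L hnd m).1, (BInv L hnd after hafter m).1]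

-- ===== VERDICT (by name: the statement is the Claim_ definition above) =====
theorem exhaustive_spec : Claim_equal_exhaustive := by
  intro data _ _
  show exhaustive data = exhaustive_alt data
  show (dictAFold (itemsOf data) (maxOf data)).items
      = (bFold (itemsOf data) (afterOf (itemsOf data)) (maxOf data)).1.items
  have hnd : (itemsOf data).Nodup := nodup_itemsLoop data [] (by simp)
  exact main_eq (itemsOf data) hnd (afterOf (itemsOf data))
    (fun x hx => after_getD (itemsOf data) hnd x hx) (maxOf data) (maxOf_nonneg data)
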